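-- pv_equiv track=rewrite | github.com/tainstr/misura.client | misura/client/iutils.py | guessNextName
-- ===== SOURCE A (Python) =====
-- def guessNextName(name):
--     """Add +1 to a name composed of string+integer"""
--     v = list(name)
--     if len(v) < 1:
--         return '', 0, '0'
--     dg = set('0123456789')
--     if v[-1] not in dg:
--         return name, 1, name + '1'
--     n = []
--     while len(v) > 0:
--         c = v.pop()
--         if c in dg:
--             n.append(c)
--         else:
--             v.append(c)
--             break
--     n.reverse()
--     n = int(''.join(n))
--     name = ''.join(v)
--     return name, n, name + str(n + 1)
-- ===== SOURCE B (Python) =====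
-- import re
--
-- def guessNextName(name):
--     """Add +1 to a name composed of string+integer"""
--     if not name:
--         return '', 0, '0'
--     m = re.search(r'[0-9]+\Z', name)
--     if m is None:
--         return name, 1, name + '1'
--     prefix = name[:m.start()]
--     n = int(m.group())
--     return prefix, n, prefix + str(n + 1)
-- ===== Notes on version B (the rewrite author's own statement) =====
-- stated objective: idiomatic
-- what changed: Replaces the manual pop-from-end loop with reversed-digit accumulation by a single trailing-digit regex search that extracts prefix and numeric suffix directly.
import Mathlib
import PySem

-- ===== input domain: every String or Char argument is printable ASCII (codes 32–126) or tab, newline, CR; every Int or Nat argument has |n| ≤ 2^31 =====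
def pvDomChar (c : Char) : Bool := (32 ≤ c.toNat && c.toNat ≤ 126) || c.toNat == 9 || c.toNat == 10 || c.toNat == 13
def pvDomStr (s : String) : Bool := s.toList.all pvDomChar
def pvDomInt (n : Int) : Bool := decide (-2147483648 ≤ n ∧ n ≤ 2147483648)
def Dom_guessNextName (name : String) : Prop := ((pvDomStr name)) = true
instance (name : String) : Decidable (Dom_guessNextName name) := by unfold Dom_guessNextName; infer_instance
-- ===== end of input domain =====

-- B replaces A's manual pop-from-end loop and reversed-digit accumulation by a single
-- trailing-digit pattern match (regex [0-9]+\Z) that extracts prefix and suffix directly (idiomatic).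

-- ===== PORT A =====
-- the while-loop: pop chars from the end of v while they are digits, collecting them in n
def guessNextNameLoop (v n : List Char) : List Char × List Char :=
  if hv : v = [] then (v, n)
  else
    let c := v.getLast hv
    if ("0123456789".toList).contains c then
      guessNextNameLoop v.dropLast (n ++ [c])
    else (v, n)
termination_by v.length
decreasing_by
  have : 0 < v.length := List.length_pos_iff.mpr hv
  simp [List.length_dropLast]; omega

def guessNextName (name : String) : String × Int × String :=
  let v := name.toList
  if v.length < 1 then ("", 0, "0")
  else
    -- v[-1]: in range because len(v) ≥ 1 here
    let last := v.getLastD ' '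
    if ¬ (("0123456789".toList).contains last) then (name, 1, name ++ "1")
    else
      let p := guessNextNameLoop v []
      let nrev := p.2.reverse
      -- int(''.join(n)): n is a nonempty digit string here, so int() never raises
      let num := (PySem.Int.ofStr? (String.ofList nrev)).getD 0
      let name2 := String.ofList p.1
      (name2, num, name2 ++ PySem.Int.toStr (num + 1))

-- ===== PORT B =====
-- re.search(r'[0-9]+\Z', name): the maximal run of ASCII digits at the very end of the string
def guessNextName_alt (name : String) : String × Int × String :=
  if name = "" then ("", 0, "0")
  else
    let rev := name.toList.reverse
    let suf := (rev.takeWhile fun c => '0' ≤ c && c ≤ '9').reverse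
    if suf = [] then (name, 1, name ++ "1")
    else
      let pre := (rev.dropWhile fun c => '0' ≤ c && c ≤ '9').reverse
      -- int(m.group()): a nonempty digit string, never raises
      let n := (PySem.Int.ofStr? (String.ofList suf)).getD 0
      (String.ofList pre, n, String.ofList pre ++ PySem.Int.toStr (n + 1))

-- ===== PRECONDITION & SPEC =====
def Spec_guessNextName (name : String) (out : String × Int × String) : Prop := out = guessNextName_alt name
instance (name : String) (out : String × Int × String) : Decidable (Spec_guessNextName name out) := by unfold Spec_guessNextName; infer_instance

-- ===== CLAIM (what is proved, stated in full; the proofs are below) =====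
def Claim_equal_guessNextName : Prop := ∀ (name : String), Dom_guessNextName name → Spec_guessNextName name (guessNextName name)

-- ===== LEMMAS AND PROOFS =====

-- membership in set('0123456789') is exactly the char class [0-9]
theorem pv_contains_dg (c : Char) : (("0123456789".toList).contains c) = ('0' ≤ c && c ≤ '9') := by
  have h : "0123456789".toList = ['0','1','2','3','4','5','6','7','8','9'] := rfl
  rw [h, Bool.eq_iff_iff]
  simp only [List.contains_eq_mem, List.mem_cons, List.not_mem_nil, or_false, decide_eq_true_eq,
    Bool.and_eq_true]
  constructor
  · rintro (rfl|rfl|rfl|rfl|rfl|rfl|rfl|rfl|rfl|rfl) <;> exact ⟨by decide, by decide⟩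
  · rintro ⟨h1, h2⟩
    have g1 : (48:ℕ) ≤ c.toNat := Fin.mk_le_mk.mp h1
    have g2 : c.toNat ≤ (57:ℕ) := Fin.mk_le_mk.mp h2
    have e : ∀ d : Char, c.toNat = d.toNat → c = d := by
      intro d hd
      have := congrArg Char.ofNat hd
      rwa [Char.ofNat_toNat, Char.ofNat_toNat] at this
    interval_cases hc : c.toNat <;>
      first
      | exact Or.inl (e '0' (by decide))
      | exact Or.inr (Or.inl (e '1' (by decide)))
      | exact Or.inr (Or.inr (Or.inl (e '2' (by decide))))
      | exact Or.inr (Or.inr (Or.inr (Or.inl (e '3' (by decide)))))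
      | exact Or.inr (Or.inr (Or.inr (Or.inr (Or.inl (e '4' (by decide))))))
      | exact Or.inr (Or.inr (Or.inr (Or.inr (Or.inr (Or.inl (e '5' (by decide)))))))
      | exact Or.inr (Or.inr (Or.inr (Or.inr (Or.inr (Or.inr (Or.inl (e '6' (by decide))))))))
      | exact Or.inr (Or.inr (Or.inr (Or.inr (Or.inr (Or.inr (Or.inr (Or.inl (e '7' (by decide)))))))))
      | exact Or.inr (Or.inr (Or.inr (Or.inr (Or.inr (Or.inr (Or.inr (Or.inr (Or.inl (e '8' (by decide))))))))))
      | exact Or.inr (Or.inr (Or.inr (Or.inr (Or.inr (Or.inr (Or.inr (Or.inr (Or.inr (e '9' (by decide))))))))))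

-- the pop-from-end loop computes dropWhile/takeWhile of the reversed list
theorem pv_loop_eq (r n : List Char) :
    guessNextNameLoop r.reverse n =
      ((r.dropWhile fun c => '0' ≤ c && c ≤ '9').reverse,
        n ++ r.takeWhile fun c => '0' ≤ c && c ≤ '9') := by
  induction r generalizing n with
  | nil => simp [guessNextNameLoop]
  | cons c t ih =>
    have hne : t.reverse ++ [c] ≠ [] := by simp
    rw [List.reverse_cons, guessNextNameLoop, dif_neg hne]
    simp only [List.getLast_concat, List.dropLast_concat, pv_contains_dg]
    by_cases hc : ('0' ≤ c && c ≤ '9') = true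
    · rw [if_pos hc, ih]
      simp [hc]
    · rw [if_neg hc]
      simp [hc]

-- ===== VERDICT (by name: the statement is the Claim_ definition above) =====
theorem guessNextName_spec : Claim_equal_guessNextName := by
  intro name _
  unfold Spec_guessNextName guessNextName guessNextName_alt
  have hmk : String.ofList name.toList = name := String.ofList_toList
  by_cases h0 : name.toList = []
  · have hname : name = "" := by
      rw [← hmk, h0]
    simp [hname]
  · have hlen : ¬ (name.toList.length < 1) := by
      have := List.length_pos_iff.mpr h0; omega
    have hne : name = "" → False := by
      intro h; rw [h] at h0; exact h0 rfl
    rcases hr : name.toList.reverse with _ | ⟨c, t⟩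
    · exact absurd (by simpa using congrArg List.reverse hr) h0
    have hl : name.toList = t.reverse ++ [c] := by
      have := congrArg List.reverse hr; simpa using this
    have hlast : name.toList.getLastD ' ' = c := by
      rw [hl, List.getLastD_concat]
    have hloop := pv_loop_eq (c :: t) []
    rw [← hr, List.reverse_reverse] at hloop
    simp only [if_neg hlen, if_neg hne, hlast, hloop, pv_contains_dg, hr]
    by_cases hc : ('0' ≤ c && c ≤ '9') = true
    · simp [hc]
    · simp [hc]
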